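-- pv_equiv track=rewrite | github.com/SaviolaX/Dataox_scraper | utils.py | fixing_location_format
-- ===== SOURCE A (Python) =====
-- def fixing_location_format(incorrect_location: str) -> str:
--     """Fix a location format
--     removing all unnecessary words in location title"""
--     splited_location = incorrect_location.split(' ')
--     items_to_remove = ['City', 'of']
--     for i in items_to_remove:
--         if i in splited_location:
--             splited_location.remove(i)
--         else:
--             pass
--     return ''.join(splited_location)
-- ===== SOURCE B (Python) =====
-- def fixing_location_format(incorrect_location: str) -> str:
--     pending = {'City', 'of'}
--     kept = []
--     for token in incorrect_location.split(' '):
--         if token in pending: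
--             pending.remove(token)
--         else:
--             kept.append(token)
--     return ''.join(kept)
-- ===== Notes on version B (the rewrite author's own statement) =====
-- stated objective: alternative
-- what changed: Replaces A's per-removal-word whole-list membership test plus .remove() scan with a single pass over the tokens that consumes a pending set {'City','of'}, dropping each word's first occurrence as it is met.
import Mathlib
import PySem

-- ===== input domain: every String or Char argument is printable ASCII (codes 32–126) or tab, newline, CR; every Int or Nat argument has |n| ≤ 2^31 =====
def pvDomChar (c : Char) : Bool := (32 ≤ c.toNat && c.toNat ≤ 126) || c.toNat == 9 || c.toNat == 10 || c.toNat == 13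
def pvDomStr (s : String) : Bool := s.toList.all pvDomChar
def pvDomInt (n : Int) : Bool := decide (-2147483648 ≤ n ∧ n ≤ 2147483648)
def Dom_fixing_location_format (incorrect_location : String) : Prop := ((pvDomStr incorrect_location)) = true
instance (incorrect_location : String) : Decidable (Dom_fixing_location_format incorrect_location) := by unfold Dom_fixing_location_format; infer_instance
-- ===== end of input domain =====

-- B is an alternative decomposition: one pass over the tokens consuming a pending set, instead of A's per-word membership test + .remove() scan.

-- ===== PORT A =====
-- split(' '), then 'for i in ["City","of"]: if i in lst: lst.remove(i)', then ''.join
def fixing_location_format (incorrect_location : String) : String :=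
  let splited_location := (PySem.Str.split? incorrect_location " ").getD []
  let items_to_remove : List String := ["City", "of"]
  let splited_location := items_to_remove.foldl
    (fun acc i => if acc.contains i then (PySem.List.remove? acc i).getD acc else acc)
    splited_location
  PySem.Str.join "" splited_location

-- ===== PORT B =====
-- loop body of B: state = (pending set of words still to drop, kept tokens)
def pvStepB (st : PySem.Set String × List String) (token : String) : PySem.Set String × List String :=
  if PySem.Set.contains st.1 token then ((PySem.Set.remove? st.1 token).getD st.1, st.2)
  else (st.1, st.2 ++ [token])

def fixing_location_format_alt (incorrect_location : String) : String :=
  let pending : PySem.Set String := PySem.Set.ofList ["City", "of"]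
  let kept : List String := []
  let st := ((PySem.Str.split? incorrect_location " ").getD []).foldl pvStepB (pending, kept)
  PySem.Str.join "" st.2

-- ===== PRECONDITION & SPEC =====
def Spec_fixing_location_format (incorrect_location : String) (out : String) : Prop := out = fixing_location_format_alt incorrect_location
instance (incorrect_location : String) (out : String) : Decidable (Spec_fixing_location_format incorrect_location out) := by unfold Spec_fixing_location_format; infer_instance

-- ===== CLAIM (what is proved, stated in full; the proofs are below) =====
def Claim_equal_fixing_location_format : Prop := ∀ (incorrect_location : String), Dom_fixing_location_format incorrect_location → Spec_fixing_location_format incorrect_location (fixing_location_format incorrect_location)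

-- ===== LEMMAS AND PROOFS =====

-- A's per-word step is first-occurrence erase
theorem pvStepA_eq_erase (xs : List String) (i : String) :
    (if xs.contains i then (PySem.List.remove? xs i).getD xs else xs) = xs.erase i := by
  by_cases h : i ∈ xs
  · rw [if_pos (List.elem_eq_true_of_mem h), PySem.List.remove?_eq_some_erase xs i h,
      Option.getD_some]
  · rw [if_neg (by simpa using h), List.erase_of_not_mem h]

-- B's loop, for each reachable pending state, erases the first occurrence of each pending word
theorem pvLoopB (xs : List String) : ∀ (k : List String),
    ((xs.foldl pvStepB (["City", "of"], k)).2 = k ++ (xs.erase "City").erase "of"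
    ∧ (xs.foldl pvStepB (["of"], k)).2 = k ++ xs.erase "of"
    ∧ (xs.foldl pvStepB (["City"], k)).2 = k ++ xs.erase "City"
    ∧ (xs.foldl pvStepB (([] : List String), k)).2 = k ++ xs) := by
  induction xs with
  | nil => intro k; simp
  | cons x xs ih =>
    intro k
    refine ⟨?_, ?_, ?_, ?_⟩
    · by_cases hc : x = "City"
      · subst hc
        simpa [List.foldl_cons, pvStepB, PySem.Set.contains, PySem.Set.remove?, PySem.Set.discard, List.erase_cons]
          using (ih k).2.1
      · by_cases ho : x = "of"
        · subst ho
          simpa [List.foldl_cons, pvStepB, PySem.Set.contains, PySem.Set.remove?, PySem.Set.discard, List.erase_cons]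
            using (ih k).2.2.1
        · have := (ih (k ++ [x])).1
          simp [List.foldl_cons, pvStepB, PySem.Set.contains, hc, ho, this]
    · by_cases ho : x = "of"
      · subst ho
        simpa [List.foldl_cons, pvStepB, PySem.Set.contains, PySem.Set.remove?, PySem.Set.discard, List.erase_cons]
          using (ih k).2.2.2
      · have := (ih (k ++ [x])).2.1
        simp [List.foldl_cons, pvStepB, PySem.Set.contains, ho, this]
    · by_cases hc : x = "City"
      · subst hc
        simpa [List.foldl_cons, pvStepB, PySem.Set.contains, PySem.Set.remove?, PySem.Set.discard, List.erase_cons]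
          using (ih k).2.2.2
      · have := (ih (k ++ [x])).2.2.1
        simp [List.foldl_cons, pvStepB, PySem.Set.contains, hc, this]
    · have := (ih (k ++ [x])).2.2.2
      simp [List.foldl_cons, pvStepB, PySem.Set.contains, this]

-- ===== VERDICT (by name: the statement is the Claim_ definition above) =====
theorem fixing_location_format_spec : Claim_equal_fixing_location_format := by
  intro s _
  unfold Spec_fixing_location_format fixing_location_format fixing_location_format_alt
  simp only [List.foldl_cons, List.foldl_nil, pvStepA_eq_erase]
  rw [show PySem.Set.ofList ["City", "of"] = ["City", "of"] from by decide,
    (pvLoopB ((PySem.Str.split? s " ").getD []) []).1]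
  simp
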